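-- pv_equiv track=rewrite | github.com/LoyanLi/Presto | presto/infra/ptsl_gateway.py | _diff_new_tracks
-- ===== SOURCE A (Python) =====
-- from collections import Counter
--
-- def _diff_new_tracks(before: list[str], after: list[str]) -> list[str]:
--     before_counts = Counter(before)
--     new_tracks: list[str] = []
--     for track_name in after:
--         if before_counts[track_name] > 0:
--             before_counts[track_name] -= 1
--         else:
--             new_tracks.append(track_name)
--     return new_tracks
-- ===== SOURCE B (Python) =====
-- def _diff_new_tracks(before: list[str], after: list[str]) -> list[str]:
--     remaining = list(after)
--     for name in before:
--         if name in remaining: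
--             remaining.remove(name)
--     return remaining
-- ===== Notes on version B (the rewrite author's own statement) =====
-- stated objective: simpler
-- what changed: Instead of building a Counter of `before` and filtering `after` against decrementing counts, B copies `after` and deletes the first occurrence of each `before` element via list.remove, returning what remains.
import Mathlib
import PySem

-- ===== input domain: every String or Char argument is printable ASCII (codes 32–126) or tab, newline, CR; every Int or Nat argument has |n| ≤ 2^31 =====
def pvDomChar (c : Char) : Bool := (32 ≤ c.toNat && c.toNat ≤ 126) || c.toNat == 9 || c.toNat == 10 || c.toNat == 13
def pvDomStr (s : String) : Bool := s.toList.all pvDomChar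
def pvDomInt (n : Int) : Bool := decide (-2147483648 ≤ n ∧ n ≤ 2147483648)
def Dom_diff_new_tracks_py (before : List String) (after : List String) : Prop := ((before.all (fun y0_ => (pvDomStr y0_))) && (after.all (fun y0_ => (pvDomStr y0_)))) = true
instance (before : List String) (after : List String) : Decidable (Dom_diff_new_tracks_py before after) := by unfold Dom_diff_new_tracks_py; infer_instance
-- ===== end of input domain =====

-- B replaces A's Counter-and-filter pass with "copy `after`, delete the first occurrence of each
-- `before` element": simpler (no counter bookkeeping), not faster.

-- ===== PORT A =====
-- Counter(before); then one pass over `after`, decrementing or appending.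
def diff_new_tracks_py (before : List String) (after : List String) : List String :=
  let before_counts := PySem.Dict.counter before
  (after.foldl
    (fun (st : PySem.Dict String Int × List String) (track_name : String) =>
      if st.1.getD track_name 0 > 0 then
        (st.1.insert track_name (st.1.getD track_name 0 - 1), st.2)
      else
        (st.1, st.2 ++ [track_name]))
    (before_counts, ([] : List String))).2

-- ===== PORT B =====
-- remaining = list(after); for name in before: if name in remaining: remaining.remove(name)
def diff_new_tracks_py_alt (before : List String) (after : List String) : List String :=
  before.foldl
    (fun (remaining : List String) (name : String) =>
      if name ∈ remaining then (PySem.List.remove? remaining name).getD remaining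
      else remaining)
    after

-- ===== PRECONDITION & SPEC =====
def Spec_diff_new_tracks_py (before : List String) (after : List String) (out : List String) : Prop := out = diff_new_tracks_py_alt before after
instance (before : List String) (after : List String) (out : List String) : Decidable (Spec_diff_new_tracks_py before after out) := by unfold Spec_diff_new_tracks_py; infer_instance

-- ===== CLAIM (what is proved, stated in full; the proofs are below) =====
def Claim_equal_diff_new_tracks_py : Prop := ∀ (before : List String) (after : List String), Dom_diff_new_tracks_py before after → Spec_diff_new_tracks_py before after (diff_new_tracks_py before after)

-- ===== LEMMAS AND PROOFS =====

-- Abstract form of A's filtering loop: the counter is a plain function String → Nat.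
def loopF : List String → (String → Nat) → List String
  | [], _ => []
  | t :: rest, f =>
      if 0 < f t then loopF rest (Function.update f t (f t - 1))
      else t :: loopF rest f

-- A's foldl over `after` (dict counter, output accumulator) computes acc ++ loopF after f
-- whenever the dict agrees with f.
theorem foldA_eq_loopF (after : List String) :
    ∀ (d : PySem.Dict String Int) (acc : List String) (f : String → Nat),
      (∀ s, d.getD s 0 = (f s : Int)) →
      (after.foldl
        (fun (st : PySem.Dict String Int × List String) (t : String) =>
          if st.1.getD t 0 > 0 then (st.1.insert t (st.1.getD t 0 - 1), st.2)
          else (st.1, st.2 ++ [t]))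
        (d, acc)).2 = acc ++ loopF after f := by
  induction after with
  | nil => intro d acc f _; simp [loopF]
  | cons t rest ih =>
    intro d acc f h
    simp only [List.foldl_cons, loopF]
    by_cases hp : 0 < f t
    · have hc : d.getD t 0 > 0 := by rw [h t]; exact_mod_cast hp
      rw [if_pos hc, if_pos hp]
      exact ih _ _ (Function.update f t (f t - 1)) (by
        intro s
        rw [PySem.Dict.getD_insert]
        by_cases hs : s = t
        · subst hs; rw [if_pos rfl, Function.update_self, h s]
          omega
        · rw [if_neg hs, Function.update_of_ne hs, h s])
    · have hc : ¬ d.getD t 0 > 0 := by rw [h t]; exact_mod_cast hp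
      rw [if_neg hc, if_neg hp, ih _ _ f h]
      simp

theorem loopF_zero (after : List String) : loopF after (fun _ => 0) = after := by
  induction after with
  | nil => rfl
  | cons t rest ih => simp [loopF, ih]

-- Adding one unit of x to the counter makes loopF consume the first occurrence of x from the list.
theorem loopF_update_succ (x : String) (after : List String) :
    ∀ (f : String → Nat),
      loopF after (Function.update f x (f x + 1)) =
        if x ∈ after then loopF (after.erase x) f else loopF after f := by
  induction after with
  | nil => intro f; simp [loopF]
  | cons t rest ih =>
    intro f
    by_cases ht : t = x
    · subst ht
      simp only [loopF, Function.update_self, List.mem_cons, true_or, if_pos,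
        List.erase_cons_head]
      rw [if_pos (Nat.succ_pos _)]
      congr 1
      funext s
      by_cases hs : s = t
      · subst hs; simp [Function.update_self]
      · simp [Function.update_of_ne hs]
    · have htx : ¬(t == x) = true := by simp [ht]
      have hmem : (x ∈ t :: rest) ↔ (x ∈ rest) := by
        rw [List.mem_cons]; exact or_iff_right (fun h => ht h.symm)
      simp only [loopF, Function.update_of_ne ht]
      by_cases hp : 0 < f t
      · rw [if_pos hp]
        have hcomm : Function.update (Function.update f x (f x + 1)) t (f t - 1)
            = Function.update (Function.update f t (f t - 1)) x
                ((Function.update f t (f t - 1)) x + 1) := by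
          rw [Function.update_of_ne (fun h => ht h.symm)]
          exact Function.update_comm (fun h => ht h.symm) _ _ f
        rw [hcomm, ih]
        by_cases hx : x ∈ rest
        · rw [if_pos hx, if_pos (hmem.mpr hx), List.erase_cons_tail htx]
          simp only [loopF, if_pos hp]
        · rw [if_neg hx, if_neg (fun h => hx (hmem.mp h))]
          simp only [loopF, if_pos hp]
      · rw [if_neg hp, ih]
        by_cases hx : x ∈ rest
        · rw [if_pos hx, if_pos (hmem.mpr hx), List.erase_cons_tail htx]
          simp only [loopF, if_neg hp]
        · rw [if_neg hx, if_neg (fun h => hx (hmem.mp h))]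
          simp only [loopF, if_neg hp]

-- (b :: bs).count as an update of bs.count
theorem count_cons_update (b : String) (bs : List String) :
    (fun s => (b :: bs).count s) = Function.update (fun s => bs.count s) b (bs.count b + 1) := by
  funext s
  by_cases hs : s = b
  · subst hs; simp [Function.update_self]
  · simp [Function.update_of_ne hs, Ne.symm hs]

theorem altB_eq_loopF (before : List String) :
    ∀ after : List String,
      diff_new_tracks_py_alt before after = loopF after (fun s => before.count s) := by
  induction before with
  | nil => intro after; simp [diff_new_tracks_py_alt, loopF_zero]
  | cons b bs ih =>
    intro after
    have step : (if b ∈ after then (PySem.List.remove? after b).getD after else after)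
        = if b ∈ after then after.erase b else after := by
      by_cases hb : b ∈ after
      · rw [if_pos hb, if_pos hb, PySem.List.remove?_eq_some_erase after b hb]; rfl
      · rw [if_neg hb, if_neg hb]
    calc diff_new_tracks_py_alt (b :: bs) after
        = diff_new_tracks_py_alt bs
            (if b ∈ after then (PySem.List.remove? after b).getD after else after) := by
          simp [diff_new_tracks_py_alt]
      _ = loopF (if b ∈ after then after.erase b else after) (fun s => bs.count s) := by
          rw [step] at *; exact ih _
      _ = loopF after (fun s => (b :: bs).count s) := by
          rw [count_cons_update, loopF_update_succ]
          by_cases hb : b ∈ after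
          · rw [if_pos hb, if_pos hb]
          · rw [if_neg hb, if_neg hb]

-- ===== VERDICT (by name: the statement is the Claim_ definition above) =====
theorem diff_new_tracks_py_spec : Claim_equal_diff_new_tracks_py := by
  intro before after _
  unfold Spec_diff_new_tracks_py diff_new_tracks_py
  rw [altB_eq_loopF]
  exact foldA_eq_loopF after _ [] _ (fun s => PySem.Dict.getD_counter before s)
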